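-- pv_equiv track=rewrite | github.com/Jalynn-X/cs61a-2020 | homework/hw02/hw02/hw02.py | missing_digits
-- ===== SOURCE A (Python) =====
-- def missing_digits(n):
--     """Given a number a that is in sorted, increasing order,
--     return the number of missing digits in n. A missing digit is
--     a number between the first and last digit of a that is not in n.
--     >>> missing_digits(1248) # 3, 5, 6, 7
--     4
--     >>> missing_digits(1122) # No missing numbers
--     0
--     >>> missing_digits(123456) # No missing numbers
--     0
--     >>> missing_digits(3558) # 4, 6, 7
--     3
--     >>> missing_digits(35578) # 4, 6
--     2
--     >>> missing_digits(12456) # 3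
--     1
--     >>> missing_digits(16789) # 2, 3, 4, 5
--     4
--     >>> missing_digits(19) # 2, 3, 4, 5, 6, 7, 8
--     7
--     >>> missing_digits(4) # No missing numbers between 4 and 4
--     0
--     >>> from construct_check import check
--     >>> # ban while or for loops
--     >>> check(HW_SOURCE_FILE, 'missing_digits', ['While', 'For'])
--     True
--     """
--     "*** YOUR CODE HERE ***"
--     if n < 10:
--         return 0
--     else:
--         if ((n // 10) % 10) == (n % 10):
--             return missing_digits(n // 10) + 0
--         else:
--             return missing_digits(n // 10) + abs(((n // 10) % 10) - (n % 10) + 1)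
-- ===== SOURCE B (Python) =====
-- def missing_digits(n):
--     if n < 10:
--         return 0
--     s = str(n)
--     total = 0
--     for a, b in zip(s, s[1:]):
--         if a != b:
--             total += abs(ord(a) - ord(b) + 1)
--     return total
-- ===== Notes on version B (the rewrite author's own statement) =====
-- stated objective: alternative
-- what changed: Replaced A's digit-by-digit recursion via repeated floor division with a single left-to-right loop over adjacent character pairs of str(n) (zip of the string with itself shifted), accumulating abs(ord(a)-ord(b)+1) for unequal pairs.
import Mathlib
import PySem

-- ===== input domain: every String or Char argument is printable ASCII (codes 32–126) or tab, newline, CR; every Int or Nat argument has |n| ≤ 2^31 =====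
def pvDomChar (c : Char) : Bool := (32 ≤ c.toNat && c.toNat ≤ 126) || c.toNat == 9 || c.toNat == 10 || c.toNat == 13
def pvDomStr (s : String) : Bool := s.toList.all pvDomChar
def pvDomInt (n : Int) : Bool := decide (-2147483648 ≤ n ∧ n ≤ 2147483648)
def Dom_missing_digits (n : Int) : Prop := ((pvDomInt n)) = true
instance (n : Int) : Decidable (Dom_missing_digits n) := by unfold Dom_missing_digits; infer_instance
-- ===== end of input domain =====

-- B replaces A's recursion on n//10 by one loop over adjacent character pairs of str(n) (objective: alternative decomposition, same cost).

-- ===== PORT A =====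
def missing_digits (n : Int) : Int :=
  if n < 10 then 0
  else
    if PySem.Int.mod (PySem.Int.floordiv n 10) 10 = PySem.Int.mod n 10 then
      missing_digits (PySem.Int.floordiv n 10) + 0
    else
      missing_digits (PySem.Int.floordiv n 10) +
        |PySem.Int.mod (PySem.Int.floordiv n 10) 10 - PySem.Int.mod n 10 + 1|
termination_by n.toNat
decreasing_by
  all_goals
    rw [PySem.Int.floordiv_eq_ediv_of_pos (by omega)]
    omega

-- ===== PORT B =====
-- loop body: `if a != b: total += abs(ord(a) - ord(b) + 1)`
def pvPairStep (total : Int) (p : Char × Char) : Int :=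
  if p.1 ≠ p.2 then total + |(p.1.toNat : Int) - (p.2.toNat : Int) + 1| else total

-- `for a, b in zip(s, s[1:])` over the chars of str(n); str(n) is PySem.Int.toChars n
def missing_digits_alt (n : Int) : Int :=
  if n < 10 then 0
  else
    let s := PySem.Int.toChars n
    (s.zip (s.drop 1)).foldl pvPairStep 0

-- ===== PRECONDITION & SPEC =====
def Spec_missing_digits (n : Int) (out : Int) : Prop := out = missing_digits_alt n
instance (n : Int) (out : Int) : Decidable (Spec_missing_digits n out) := by unfold Spec_missing_digits; infer_instance

-- ===== CLAIM (what is proved, stated in full; the proofs are below) =====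
def Claim_equal_missing_digits : Prop := ∀ (n : Int), Dom_missing_digits n → Spec_missing_digits n (missing_digits n)

-- ===== LEMMAS AND PROOFS =====

-- accumulator lemma for Nat.toDigitsCore
lemma pvTdcAcc (b : Nat) : ∀ (f n : Nat) (ds : List Char),
    Nat.toDigitsCore b f n ds = Nat.toDigitsCore b f n [] ++ ds := by
  intro f
  induction f with
  | zero => intro n ds; simp [Nat.toDigitsCore]
  | succ f ih =>
    intro n ds
    simp only [Nat.toDigitsCore]
    by_cases h : n / b = 0
    · simp [h]
    · simp only [h, if_false]
      rw [ih (n / b) ((n % b).digitChar :: ds), ih (n / b) [(n % b).digitChar]]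
      simp

-- fuel independence: any fuel > n gives the canonical value
lemma pvTdcFuel (b : Nat) (hb : 2 ≤ b) : ∀ (n f : Nat), n < f →
    Nat.toDigitsCore b f n [] = Nat.toDigitsCore b (n + 1) n [] := by
  intro n
  induction n using Nat.strong_induction_on with
  | _ n ih =>
    intro f hf
    match f, hf with
    | f + 1, hf =>
      simp only [Nat.toDigitsCore]
      by_cases h : n / b = 0
      · simp [h]
      · simp only [h, if_false]
        have hn0 : 0 < n := by
          rcases Nat.eq_zero_or_pos n with h0 | h0
          · subst h0; simp at h
          · exact h0
        have hlt : n / b < n := Nat.div_lt_self hn0 (by omega)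
        rw [pvTdcAcc, pvTdcAcc b n]
        rw [ih (n / b) hlt f (by omega), ih (n / b) hlt n (by omega)]

lemma pvToDigits_small (m : Nat) (h : m < 10) :
    Nat.toDigits 10 m = [Nat.digitChar m] := by
  have h0 : m / 10 = 0 := Nat.div_eq_of_lt h
  simp [Nat.toDigits, Nat.toDigitsCore, h0, Nat.mod_eq_of_lt h]

lemma pvToDigits_step (m : Nat) (h : 10 ≤ m) :
    Nat.toDigits 10 m = Nat.toDigits 10 (m / 10) ++ [Nat.digitChar (m % 10)] := by
  have h1 : 0 < m / 10 := Nat.div_pos h (by omega)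
  have h2 : m / 10 < m := Nat.div_lt_self (by omega) (by omega)
  simp only [Nat.toDigits, Nat.toDigitsCore]
  have hne : ¬ m / 10 = 0 := by omega
  simp only [hne, if_false]
  rw [pvTdcAcc]
  congr 1
  exact pvTdcFuel 10 (by omega) (m / 10) m h2

lemma pvDigitChar_toNat (a : Nat) (h : a < 10) :
    (Nat.digitChar a).toNat = 48 + a := by
  interval_cases a <;> rfl

lemma pvZipTailAppend {α : Type} (xs : List α) (c : α) (h : xs ≠ []) :
    (xs ++ [c]).zip ((xs ++ [c]).drop 1)
      = xs.zip (xs.drop 1) ++ [(xs.getLast h, c)] := by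
  induction xs with
  | nil => exact absurd rfl h
  | cons a t ih =>
    cases t with
    | nil => rfl
    | cons b t' =>
      have ht := ih (by simp)
      simp only [List.cons_append, List.drop_succ_cons, List.drop_zero, List.zip_cons_cons] at ht ⊢
      rw [List.getLast_cons (by simp)]
      rw [ht]

-- last digit character of toDigits, and B's value, for positive m
lemma pvLastDigit (m : Nat) :
    ∃ (P : List Char) (h : P ≠ []),
      Nat.toDigits 10 m = P ∧ P.getLast h = Nat.digitChar (m % 10) := by
  by_cases h10 : m < 10
  · exact ⟨[Nat.digitChar m], by simp, pvToDigits_small m h10,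
      by simp [Nat.mod_eq_of_lt h10]⟩
  · refine ⟨Nat.toDigits 10 (m / 10) ++ [Nat.digitChar (m % 10)], by simp,
      pvToDigits_step m (by omega), by simp⟩

-- B's loop one step back: for 10 ≤ n,
-- B n = B (n/10) + contribution of the last adjacent pair
lemma pvAltRec (n : Int) (h : 10 ≤ n) :
    missing_digits_alt n
      = missing_digits_alt (n / 10)
        + (if (n / 10) % 10 = n % 10 then 0 else |(n / 10) % 10 - n % 10 + 1|) := by
  have hn0 : (0:Int) ≤ n := by omega
  have hT : n.toNat ≥ 10 := by omega
  set m : Nat := n.toNat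
  have hchars : PySem.Int.toChars n = Nat.toDigits 10 m := by
    simp only [PySem.Int.toChars, show ¬ n < 0 by omega, if_false]
    rfl
  obtain ⟨P, hPne, hPeq, hPlast⟩ := pvLastDigit (m / 10)
  have hsplit : Nat.toDigits 10 m = P ++ [Nat.digitChar (m % 10)] := by
    rw [pvToDigits_step m hT, hPeq]
  -- cast facts between Int and Nat arithmetic
  have hq : (n / 10).toNat = m / 10 := by omega
  have hqn : (0:Int) ≤ n / 10 := by omega
  have hhi : (n / 10) % 10 = (((m / 10) % 10 : Nat) : Int) := by omega
  have hlo : n % 10 = ((m % 10 : Nat) : Int) := by omega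
  -- unfold B at n
  rw [missing_digits_alt]
  simp only [show ¬ n < 10 by omega, if_false]
  rw [hchars, hsplit, pvZipTailAppend P (Nat.digitChar (m % 10)) hPne,
      List.foldl_append]
  -- the last step is the claimed contribution
  have hstep : ∀ t : Int, List.foldl pvPairStep t [(P.getLast hPne, Nat.digitChar (m % 10))]
      = t + (if (n / 10) % 10 = n % 10 then 0 else |(n / 10) % 10 - n % 10 + 1|) := by
    intro t
    have ha : (m / 10) % 10 < 10 := Nat.mod_lt _ (by omega)
    have hb : m % 10 < 10 := Nat.mod_lt _ (by omega)
    simp only [List.foldl, pvPairStep, hPlast]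
    by_cases hEq : Nat.digitChar ((m / 10) % 10) = Nat.digitChar (m % 10)
    · have : ((m / 10) % 10 : Nat) = m % 10 := by
        have := congrArg Char.toNat hEq
        rw [pvDigitChar_toNat _ ha, pvDigitChar_toNat _ hb] at this
        omega
      simp [hhi, hlo, this]
    · have hne : ((m / 10) % 10 : Nat) ≠ m % 10 := by
        intro hc; exact hEq (by rw [hc])
      have hcond : ¬ ((n / 10) % 10 = n % 10) := by
        rw [hhi, hlo]; exact_mod_cast hne
      simp only [hEq, ne_eq, not_false_iff, if_true, hcond, if_false]
      rw [pvDigitChar_toNat _ ha, pvDigitChar_toNat _ hb, hhi, hlo]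
      congr 1
      push_cast
      ring_nf
  rw [hstep]
  congr 1
  -- remaining: foldl over P's pairs = B (n/10)
  rw [missing_digits_alt]
  by_cases hsm : n / 10 < 10
  · -- single digit: P = [digitChar (m/10)], no pairs
    have : m / 10 < 10 := by omega
    have hP1 : P = [Nat.digitChar (m / 10)] := by
      rw [← hPeq, pvToDigits_small _ this]
    simp [hsm, hP1]
  · have hT' : 10 ≤ m / 10 := by omega
    have hchars' : PySem.Int.toChars (n / 10) = Nat.toDigits 10 (m / 10) := by
      simp [PySem.Int.toChars, show ¬ n / 10 < 0 by omega, hq]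
    simp only [hsm, if_false]
    rw [hchars', hPeq]

-- ===== VERDICT (by name: the statement is the Claim_ definition above) =====
lemma pvAgree (n : Int) : missing_digits n = missing_digits_alt n := by
  induction n using missing_digits.induct with
  | case1 n h =>
    rw [missing_digits, missing_digits_alt]
    simp [h]
  | case2 n h heq ih =>
    rw [missing_digits]
    simp only [h, if_false, heq, if_true]
    rw [pvAltRec n (by omega)]
    rw [PySem.Int.floordiv_eq_ediv_of_pos (by omega)] at ih heq ⊢
    rw [PySem.Int.mod_eq_emod_of_pos (by omega), PySem.Int.mod_eq_emod_of_pos (by omega)] at heq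
    simp [ih, heq]
  | case3 n h hne ih =>
    rw [missing_digits]
    simp only [h, if_false, hne, if_false]
    rw [pvAltRec n (by omega)]
    rw [PySem.Int.floordiv_eq_ediv_of_pos (by omega)] at ih hne ⊢
    rw [PySem.Int.mod_eq_emod_of_pos (by omega), PySem.Int.mod_eq_emod_of_pos (by omega)] at hne
    simp [ih, hne]

theorem missing_digits_spec : Claim_equal_missing_digits := by
  unfold Claim_equal_missing_digits
  intro n _
  unfold Spec_missing_digits
  exact pvAgree n
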